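-- pv_equiv track=rewrite | github.com/sarismet/kv-raft | router/router.py | get_shard_index_from_hash
-- ===== SOURCE A (Python) =====
-- HASH_MODULO = 16384
--
-- def get_shard_index_from_hash(hash_value: int, shard_count: int) -> int:
--     """Get shard index from hash value."""
--     if shard_count <= 0:
--         raise ValueError("Shard count must be positive")
--
--     reduced_hash = hash_value % HASH_MODULO
--     bucket_size = HASH_MODULO // shard_count
--
--     for i in range(shard_count):
--         if reduced_hash < (i + 1) * bucket_size:
--             return i
--
--     return shard_count - 1
-- ===== SOURCE B (Python) =====
-- HASH_MODULO = 16384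
--
-- def get_shard_index_from_hash(hash_value: int, shard_count: int) -> int:
--     """Get shard index from hash value (closed-form, O(1))."""
--     if shard_count <= 0:
--         raise ValueError("Shard count must be positive")
--     reduced_hash = hash_value % HASH_MODULO
--     bucket_size = HASH_MODULO // shard_count
--     if bucket_size == 0:
--         return shard_count - 1
--     return min(reduced_hash // bucket_size, shard_count - 1)
-- ===== Notes on version B (the rewrite author's own statement) =====
-- stated objective: faster
-- what changed: Replaced the O(shard_count) bucket-scanning loop with a closed-form integer division min(reduced_hash // bucket_size, shard_count - 1), with the bucket_size == 0 case (shard_count > 16384) handled directly.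
import Mathlib
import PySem

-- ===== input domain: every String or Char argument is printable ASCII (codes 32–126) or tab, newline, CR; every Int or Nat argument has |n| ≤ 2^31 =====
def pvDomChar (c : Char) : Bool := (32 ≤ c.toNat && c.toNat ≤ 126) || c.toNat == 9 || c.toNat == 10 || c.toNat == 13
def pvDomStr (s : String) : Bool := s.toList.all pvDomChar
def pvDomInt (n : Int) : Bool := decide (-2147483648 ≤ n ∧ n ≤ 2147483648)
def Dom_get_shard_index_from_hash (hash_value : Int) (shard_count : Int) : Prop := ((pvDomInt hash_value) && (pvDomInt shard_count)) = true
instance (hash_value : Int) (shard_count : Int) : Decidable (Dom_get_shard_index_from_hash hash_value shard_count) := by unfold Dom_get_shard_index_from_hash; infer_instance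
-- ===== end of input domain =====

-- B replaces A's O(shard_count) bucket-scanning loop by a closed-form division (objective: faster, measured asymptotic).

-- ===== PORT A =====
-- the 'for i in range(shard_count): if reduced_hash < (i+1)*bucket_size: return i' loop
def pvLoopA (reduced b : Int) : List Int → Int → Int
  | [], d => d
  | i :: rest, d => if reduced < (i + 1) * b then i else pvLoopA reduced b rest d

def get_shard_index_from_hash (hash_value : Int) (shard_count : Int) : Int :=
  if shard_count ≤ 0 then 0   -- Python raises ValueError here; excluded by Pre_
  else
    let reduced := PySem.Int.mod hash_value 16384
    let bucket := PySem.Int.floordiv 16384 shard_count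
    pvLoopA reduced bucket (PySem.List.pyRange 0 shard_count 1) (shard_count - 1)

-- ===== PORT B =====
def get_shard_index_from_hash_alt (hash_value : Int) (shard_count : Int) : Int :=
  if shard_count ≤ 0 then 0   -- Python raises ValueError here; excluded by Pre_
  else
    let reduced := PySem.Int.mod hash_value 16384
    let bucket := PySem.Int.floordiv 16384 shard_count
    if bucket = 0 then shard_count - 1
    else min (PySem.Int.floordiv reduced bucket) (shard_count - 1)

-- ===== PRECONDITION & SPEC =====
-- Pre_ excludes shard_count ≤ 0, where Python A raises ValueError.
def Pre_get_shard_index_from_hash (hash_value : Int) (shard_count : Int) : Prop := 0 < shard_count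
instance (hash_value : Int) (shard_count : Int) : Decidable (Pre_get_shard_index_from_hash hash_value shard_count) := by unfold Pre_get_shard_index_from_hash; infer_instance
def pvWitness_get_shard_index_from_hash : Int × Int := (12345, 3)

def Spec_get_shard_index_from_hash (hash_value : Int) (shard_count : Int) (out : Int) : Prop := out = get_shard_index_from_hash_alt hash_value shard_count
instance (hash_value : Int) (shard_count : Int) (out : Int) : Decidable (Spec_get_shard_index_from_hash hash_value shard_count out) := by unfold Spec_get_shard_index_from_hash; infer_instance

-- ===== CLAIM (what is proved, stated in full; the proofs are below) =====
def Claim_equal_get_shard_index_from_hash : Prop := ∀ (hash_value : Int) (shard_count : Int), Dom_get_shard_index_from_hash hash_value shard_count → Pre_get_shard_index_from_hash hash_value shard_count → Spec_get_shard_index_from_hash hash_value shard_count (get_shard_index_from_hash hash_value shard_count)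

-- ===== LEMMAS AND PROOFS =====

-- with bucket size 0 the loop's guard never fires (reduced ≥ 0), so it falls through to the default
theorem pvLoopA_zero (reduced : Int) (hr : 0 ≤ reduced) (l : List Int) (d : Int) :
    pvLoopA reduced 0 l d = d := by
  induction l with
  | nil => rfl
  | cons i rest ih =>
      simp only [pvLoopA, mul_zero]
      rw [if_neg (by omega)]
      exact ih

-- closed form of the loop over a consecutive range starting at k, when no earlier index fired
theorem pvLoopA_closed (reduced b d : Int) (hb : 0 < b) (n : Nat) :
    ∀ (k : Int), k * b ≤ reduced →
      pvLoopA reduced b (PySem.List.pyRange k (k + (n : Int)) 1) d =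
        if PySem.Int.floordiv reduced b < k + (n : Int) then PySem.Int.floordiv reduced b else d := by
  induction n with
  | zero =>
      intro k hk
      rw [PySem.List.pyRange_one_eq_nil (by omega)]
      have hq : k ≤ PySem.Int.floordiv reduced b :=
        (PySem.Int.le_floordiv_iff_mul_le hb).mpr hk
      simp only [pvLoopA]
      rw [if_neg (by push_cast; omega)]
  | succ n ih =>
      intro k hk
      rw [PySem.List.pyRange_one_cons (by push_cast; omega)]
      simp only [pvLoopA]
      by_cases hlt : reduced < (k + 1) * b
      · rw [if_pos hlt]
        have hq : PySem.Int.floordiv reduced b = k :=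
          (PySem.Int.floordiv_eq_iff_of_pos hb).mpr ⟨hk, hlt⟩
        rw [if_pos (by push_cast; omega)]
        omega
      · rw [if_neg hlt]
        have h1 : k + ((n : Int) + 1) = (k + 1) + (n : Int) := by ring
        push_cast
        rw [h1, ih (k + 1) (by omega)]
  
theorem get_shard_index_from_hash_eq (hash_value shard_count : Int)
    (hp : 0 < shard_count) :
    get_shard_index_from_hash hash_value shard_count =
      get_shard_index_from_hash_alt hash_value shard_count := by
  unfold get_shard_index_from_hash get_shard_index_from_hash_alt
  rw [if_neg (by omega), if_neg (by omega)]
  set r := PySem.Int.mod hash_value 16384 with hrdef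
  set b := PySem.Int.floordiv 16384 shard_count with hbdef
  have hr : 0 ≤ r := by
    rw [hrdef, PySem.Int.mod_eq_emod_of_pos (by norm_num)]
    exact Int.emod_nonneg _ (by norm_num)
  have hb0 : 0 ≤ b := by
    rw [hbdef, PySem.Int.floordiv_eq_ediv_of_pos hp]
    exact Int.ediv_nonneg (by norm_num) (by omega)
  by_cases hb : b = 0
  · rw [hb]
    rw [pvLoopA_zero r hr _ _]
    simp
  · have hbpos : 0 < b := by omega
    rw [if_neg hb]
    have hrange : PySem.List.pyRange 0 shard_count 1
        = PySem.List.pyRange 0 (0 + (shard_count.toNat : Int)) 1 := by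
      congr 1; omega
    rw [hrange, pvLoopA_closed r b (shard_count - 1) hbpos shard_count.toNat 0 (by omega)]
    have hq : 0 ≤ PySem.Int.floordiv r b := by
      rw [PySem.Int.floordiv_eq_ediv_of_pos hbpos]
      exact Int.ediv_nonneg hr (by omega)
    have hsc : (shard_count.toNat : Int) = shard_count := by omega
    rw [hsc]
    rcases lt_or_ge (PySem.Int.floordiv r b) shard_count with h | h
    · rw [if_pos (by omega), min_eq_left (by omega)]
    · rw [if_neg (by omega), min_eq_right (by omega)]

-- ===== VERDICT (by name: the statement is the Claim_ definition above) =====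
theorem get_shard_index_from_hash_spec : Claim_equal_get_shard_index_from_hash := by
  intro h sc _ hp
  exact get_shard_index_from_hash_eq h sc hp
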